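-- pv_equiv track=rewrite | github.com/pypi-data/pypi-mirror-404 | packages/wenbi/wenbi-0.140.81-py3-none-any.whl/wenbi/enhanced_combination.py | is_temporally_consistent
-- ===== SOURCE A (Python) =====
-- def is_temporally_consistent(slide_idx, speech_idx, aligned_slides, tolerance=2):
--     """
--     Check if alignment is temporally consistent with previous alignments
--     Allows some flexibility with tolerance parameter
--     """
--     if not aligned_slides:
--         return True
--
--     # Get the most recent slide alignment
--     max_slide_idx = max(aligned_slides.keys())
--     corresponding_speech_indices = aligned_slides[max_slide_idx]
--
--     # Handle both single speech_idx and list of speech_indices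
--     if isinstance(corresponding_speech_indices, list):
--         if not corresponding_speech_indices:
--             return True
--         corresponding_speech_idx = max(corresponding_speech_indices)  # Use the latest one
--     else:
--         corresponding_speech_idx = corresponding_speech_indices
--
--     # Check if current alignment maintains reasonable order
--     # Allow some flexibility but prevent major temporal violations
--     if slide_idx > max_slide_idx:
--         # This slide comes after the latest aligned slide
--         # Its speech should also come after, within tolerance
--         return speech_idx >= corresponding_speech_idx - tolerance
--     else:
--         # This slide comes before or between existing alignments
--         # Check against the nearest slide alignment
--         for aligned_slide_idx, aligned_speech_idx_list in sorted(aligned_slides.items()):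
--             if isinstance(aligned_speech_idx_list, list):
--                 if not aligned_speech_idx_list:
--                     continue
--                 aligned_speech_idx = max(aligned_speech_idx_list)
--             else:
--                 aligned_speech_idx = aligned_speech_idx_list
--
--             if abs(aligned_slide_idx - slide_idx) <= tolerance:
--                 return abs(speech_idx - aligned_speech_idx) <= tolerance * 2
--
--         return True
--
--     # Get the most recent slide alignment
--     max_slide_idx = max(aligned_slides.keys())
--     corresponding_speech_idx = aligned_slides[max_slide_idx]
--
--     # Check if the current alignment maintains reasonable order
--     # Allow some flexibility but prevent major temporal violations
--     if slide_idx > max_slide_idx: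
--         # This slide comes after the latest aligned slide
--         # Its speech should also come after, within tolerance
--         return speech_idx >= corresponding_speech_idx - tolerance
--     else:
--         # This slide comes before or between existing alignments
--         # Check against the nearest slide alignment
--         for aligned_slide_idx, aligned_speech_idx in sorted(aligned_slides.items()):
--             if abs(aligned_slide_idx - slide_idx) <= tolerance:
--                 return abs(speech_idx - aligned_speech_idx) <= tolerance * 2
--
--         return True
-- ===== SOURCE B (Python) =====
-- def is_temporally_consistent(slide_idx, speech_idx, aligned_slides, tolerance=2):
--     """Single pass: track the max-key entry and the nearest (smallest qualifying
--     key) entry at once, instead of sorting all items."""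
--     best_max = None   # (key, values) with the greatest key
--     near = None       # (key, max(values)) with the smallest key within tolerance
--     for k, vs in aligned_slides.items():
--         if best_max is None or k > best_max[0]:
--             best_max = (k, vs)
--         if vs and abs(k - slide_idx) <= tolerance and (near is None or k < near[0]):
--             near = (k, max(vs))
--     if best_max is None or not best_max[1]:
--         return True
--     if slide_idx > best_max[0]:
--         return speech_idx >= max(best_max[1]) - tolerance
--     if near is None:
--         return True
--     return abs(speech_idx - near[1]) <= tolerance * 2
-- ===== Notes on version B (the rewrite author's own statement) =====
-- stated objective: faster
-- what changed: Replaces A's sort of all items plus a linear scan (and the separate max/lookup passes) by one left-to-right pass that simultaneously tracks the greatest-key entry and the smallest qualifying key within tolerance.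
import Mathlib
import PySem

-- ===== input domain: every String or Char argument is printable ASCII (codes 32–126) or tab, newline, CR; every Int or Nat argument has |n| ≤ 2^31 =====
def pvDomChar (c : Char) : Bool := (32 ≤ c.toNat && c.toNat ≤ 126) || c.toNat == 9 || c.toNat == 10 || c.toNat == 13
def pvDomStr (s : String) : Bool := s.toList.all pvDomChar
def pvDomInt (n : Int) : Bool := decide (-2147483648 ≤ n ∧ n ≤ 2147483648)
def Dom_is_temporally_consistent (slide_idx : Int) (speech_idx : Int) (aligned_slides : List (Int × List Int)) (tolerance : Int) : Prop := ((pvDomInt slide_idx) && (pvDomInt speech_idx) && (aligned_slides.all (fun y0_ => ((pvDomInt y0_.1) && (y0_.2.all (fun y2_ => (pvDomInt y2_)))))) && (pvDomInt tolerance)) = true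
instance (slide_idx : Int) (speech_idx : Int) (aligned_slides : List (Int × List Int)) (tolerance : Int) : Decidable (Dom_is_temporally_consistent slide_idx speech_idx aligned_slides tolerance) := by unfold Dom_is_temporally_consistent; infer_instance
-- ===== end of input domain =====

-- B replaces the sort-then-scan (and separate max/lookup passes) by one pass tracking the
-- greatest-key entry and the smallest qualifying key; return value only, nothing is mutated.
-- ===== PORT A =====
def itc_loop (slide_idx speech_idx tolerance : Int) : List (Int × List Int) → Bool
  | [] => true
  | (k, vs) :: rest =>
    match PySem.List.max? vs (fun y => y) with
    | none => itc_loop slide_idx speech_idx tolerance rest          -- empty speech list: continue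
    | some a =>
      if |k - slide_idx| ≤ tolerance then decide (|speech_idx - a| ≤ tolerance * 2)
      else itc_loop slide_idx speech_idx tolerance rest

-- A, step for step.  Values are always lists here (dict[int, list[int]]), so the isinstance
-- branch is the list branch; max()/[]-lookup on the nonempty dict never raise, so the two
-- 'none' fallbacks below are unreachable.  sorted(items) on a dict's distinct keys is the
-- stable key-sort (the tuple order never reaches the second component).
def is_temporally_consistent (slide_idx : Int) (speech_idx : Int) (aligned_slides : List (Int × List Int)) (tolerance : Int) : Bool :=
  if aligned_slides.isEmpty then true
  else
    match PySem.List.max? (aligned_slides.map Prod.fst) (fun y => y) with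
    | none => true                       -- unreachable: aligned_slides ≠ []
    | some max_slide_idx =>
      match List.lookup max_slide_idx aligned_slides with
      | none => true                     -- unreachable: max_slide_idx is a key
      | some corr =>
        match PySem.List.max? corr (fun y => y) with
        | none => true                   -- 'if not corresponding_speech_indices: return True'
        | some c =>
          if max_slide_idx < slide_idx then decide (speech_idx ≥ c - tolerance)
          else itc_loop slide_idx speech_idx tolerance (PySem.List.sorted aligned_slides Prod.fst false)

-- ===== PORT B =====
def itc_scan (slide_idx tolerance : Int) (aligned_slides : List (Int × List Int)) :
    Option (Int × List Int) × Option (Int × Int) :=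
  aligned_slides.foldl
    (fun st x =>
      let best := match st.1 with
        | none => some x
        | some b => if b.1 < x.1 then some x else some b
      let near := match PySem.List.max? x.2 (fun y => y) with
        | none => st.2                   -- 'if vs and …': empty list never updates near
        | some a =>
          if |x.1 - slide_idx| ≤ tolerance then
            match st.2 with
            | none => some (x.1, a)
            | some n => if x.1 < n.1 then some (x.1, a) else some n
          else st.2
      (best, near))
    (none, none)

def is_temporally_consistent_alt (slide_idx : Int) (speech_idx : Int) (aligned_slides : List (Int × List Int)) (tolerance : Int) : Bool :=
  match itc_scan slide_idx tolerance aligned_slides with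
  | (none, _) => true
  | (some best, near) =>
    match PySem.List.max? best.2 (fun y => y) with
    | none => true
    | some c =>
      if best.1 < slide_idx then decide (speech_idx ≥ c - tolerance)
      else
        match near with
        | none => true
        | some n => decide (|speech_idx - n.2| ≤ tolerance * 2)

-- ===== PRECONDITION & SPEC =====
def Spec_is_temporally_consistent (slide_idx : Int) (speech_idx : Int) (aligned_slides : List (Int × List Int)) (tolerance : Int) (out : Bool) : Prop := out = is_temporally_consistent_alt slide_idx speech_idx aligned_slides tolerance
instance (slide_idx : Int) (speech_idx : Int) (aligned_slides : List (Int × List Int)) (tolerance : Int) (out : Bool) : Decidable (Spec_is_temporally_consistent slide_idx speech_idx aligned_slides tolerance out) := by unfold Spec_is_temporally_consistent; infer_instance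

-- ===== CLAIM (what is proved, stated in full; the proofs are below) =====
def Claim_equal_is_temporally_consistent : Prop := ∀ (slide_idx : Int) (speech_idx : Int) (aligned_slides : List (Int × List Int)) (tolerance : Int), Dom_is_temporally_consistent slide_idx speech_idx aligned_slides tolerance → Spec_is_temporally_consistent slide_idx speech_idx aligned_slides tolerance (is_temporally_consistent slide_idx speech_idx aligned_slides tolerance)

-- ===== LEMMAS AND PROOFS =====
def bmax : List (Int × List Int) → Option (Int × List Int)
  | [] => none
  | x :: t =>
    match bmax t with
    | none => some x
    | some y => if x.1 < y.1 then some y else some x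

-- item qualifies for the nearest-slide check
def qual (slide_idx tolerance : Int) (x : Int × List Int) : Bool :=
  !x.2.isEmpty && decide (|x.1 - slide_idx| ≤ tolerance)

-- first qualifying item with the smallest key
def fmin (slide_idx tolerance : Int) : List (Int × List Int) → Option (Int × List Int)
  | [] => none
  | x :: t =>
    if qual slide_idx tolerance x then
      match fmin slide_idx tolerance t with
      | none => some x
      | some y => if y.1 < x.1 then some y else some x
    else fmin slide_idx tolerance t

def gnear (y : Int × List Int) : Int × Int := (y.1, (PySem.List.max? y.2 (fun v => v)).getD 0)
lemma bmax_eq_none_iff (l : List (Int × List Int)) : bmax l = none ↔ l = [] := by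
  cases l with
  | nil => simp [bmax]
  | cons x t =>
    simp only [bmax]
    cases h : bmax t
    · simp
    · simp only [List.cons_ne_nil, iff_false]
      split <;> simp

lemma bmax_concat (l : List (Int × List Int)) (x : Int × List Int) :
    bmax (l ++ [x]) = match bmax l with
      | none => some x
      | some y => if y.1 < x.1 then some x else some y := by
  induction l with
  | nil => simp [bmax]
  | cons z t ih =>
    simp only [List.cons_append, bmax, ih]
    cases h : bmax t with
    | none => simp
    | some y =>
      by_cases h1 : y.1 < x.1 <;> by_cases h2 : z.1 < y.1 <;>
        simp only [h1, h2, if_true, if_false] <;>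
        split_ifs <;> simp <;> omega

lemma fmin_concat (slide_idx tolerance : Int) (l : List (Int × List Int)) (x : Int × List Int) :
    fmin slide_idx tolerance (l ++ [x]) = match fmin slide_idx tolerance l with
      | none => if qual slide_idx tolerance x then some x else none
      | some y => if qual slide_idx tolerance x ∧ x.1 < y.1 then some x else some y := by
  induction l with
  | nil => simp [fmin]
  | cons z t ih =>
    simp only [List.cons_append, fmin, ih]
    cases h : fmin slide_idx tolerance t with
    | none =>
      by_cases hz : qual slide_idx tolerance z = true <;>
        by_cases hx : qual slide_idx tolerance x = true <;>
        simp only [hz, hx, if_true, if_false, true_and, false_and] <;>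
        split_ifs <;> simp_all <;> omega
    | some y =>
      by_cases hz : qual slide_idx tolerance z = true <;>
        by_cases hx : qual slide_idx tolerance x = true <;>
        by_cases h1 : y.1 < z.1 <;>
        simp only [hz, hx, h1, if_true, if_false, true_and, false_and] <;>
        split_ifs <;> simp_all <;> omega

lemma itc_scan_eq (slide_idx tolerance : Int) (l : List (Int × List Int)) :
    itc_scan slide_idx tolerance l = (bmax l, (fmin slide_idx tolerance l).map gnear) := by
  induction l using List.reverseRecOn with
  | nil => simp [itc_scan, bmax, fmin]
  | append_singleton t x ih =>
    simp only [itc_scan, List.foldl_append, List.foldl_cons, List.foldl_nil] at *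
    rw [ih, bmax_concat, fmin_concat]
    refine Prod.ext ?_ ?_
    · cases hb : bmax t with
      | none => simp
      | some y => simp only
    · cases hm : PySem.List.max? x.2 (fun y => y) with
      | none =>
        have hx : x.2 = [] := (PySem.List.max?_eq_none_iff ..).mp hm
        have hq : qual slide_idx tolerance x = false := by simp [qual, hx]
        cases hf : fmin slide_idx tolerance t <;> simp [hq]
      | some a =>
        have hx : ¬ x.2.isEmpty := by
          intro hc
          rw [List.isEmpty_iff] at hc
          have hmm := PySem.List.max?_mem hm
          rw [hc] at hmm
          simp at hmm
        by_cases hw : |x.1 - slide_idx| ≤ tolerance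
        · have hq : qual slide_idx tolerance x = true := by simp [qual, hw]; simpa using hx
          cases hf : fmin slide_idx tolerance t with
          | none => simp [hq, hw, gnear, hm]
          | some y =>
            simp only [hq, hw, if_true, true_and, Option.map_some]
            by_cases h1 : x.1 < y.1 <;> simp [h1, gnear, hm]
        · have hq : qual slide_idx tolerance x = false := by simp [qual, hw]
          cases hf : fmin slide_idx tolerance t <;> simp [hq, hw]

-- bmax yields the max key as A computes it
lemma bmax_spec (l : List (Int × List Int)) (m : Int) (vs : List Int)
    (h : bmax l = some (m, vs)) :
    (m, vs) ∈ l ∧ (∀ x ∈ l, x.1 ≤ m) ∧ List.lookup m l = some vs := by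
  induction l generalizing m vs with
  | nil => simp [bmax] at h
  | cons x t ih =>
    simp only [bmax] at h
    cases hb : bmax t with
    | none =>
      rw [hb] at h
      simp only [Option.some.injEq] at h
      rcases (bmax_eq_none_iff t).mp hb with rfl
      subst h
      simp [List.lookup]
    | some y =>
      rw [hb] at h
      dsimp only at h
      obtain ⟨hmem, hmax, hlook⟩ := ih y.1 y.2 (by rw [hb])
      by_cases hlt : x.1 < y.1
      · rw [if_pos hlt] at h
        injection h with h
        subst h
        refine ⟨List.mem_cons_of_mem x hmem, ?_, ?_⟩
        · intro z hz
          rcases List.mem_cons.mp hz with rfl | hz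
          · exact le_of_lt hlt
          · exact hmax z hz
        · have hne : (m == x.1) = false := by simp; omega
          simp [List.lookup, hne, hlook]
      · rw [if_neg hlt] at h
        injection h with h
        subst h
        dsimp only at hlt hmax ⊢
        refine ⟨List.mem_cons_self .., ?_, by simp [List.lookup]⟩
        intro z hz
        rcases List.mem_cons.mp hz with rfl | hz
        · exact le_refl _
        · have := hmax z hz; omega

-- A's loop is the first qualifying item of its input
lemma itc_loop_eq (slide_idx speech_idx tolerance : Int) (l : List (Int × List Int)) :
    itc_loop slide_idx speech_idx tolerance l =
      match l.find? (qual slide_idx tolerance) with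
      | none => true
      | some y => decide (|speech_idx - (gnear y).2| ≤ tolerance * 2) := by
  induction l with
  | nil => simp [itc_loop]
  | cons x t ih =>
    obtain ⟨k, vs⟩ := x
    simp only [itc_loop]
    cases hm : PySem.List.max? vs (fun y => y) with
    | none =>
      have hv : vs = [] := (PySem.List.max?_eq_none_iff ..).mp hm
      subst hv
      simp [List.find?, qual, ih]
    | some a =>
      have hvs : vs.isEmpty = false := by
        rw [List.isEmpty_eq_false_iff]
        intro h; subst h
        have := PySem.List.max?_mem hm
        simp at this
      by_cases hk : |k - slide_idx| ≤ tolerance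
      · simp [hk, List.find?, qual, hvs, gnear, hm]
      · simp [hk, List.find?, qual, hvs, ih]

-- first qualifying item of an ascending-by-key list, after inserting x
lemma find?_insertBy (slide_idx tolerance : Int) (x : Int × List Int) (l : List (Int × List Int))
    (hs : l.Pairwise (fun a b => a.1 ≤ b.1)) :
    (PySem.List.insertBy (fun a b => decide (a.1 < b.1)) x l).find? (qual slide_idx tolerance) =
      match l.find? (qual slide_idx tolerance) with
      | none => if qual slide_idx tolerance x then some x else none
      | some y => if qual slide_idx tolerance x ∧ x.1 < y.1 then some x else some y := by
  induction l with
  | nil =>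
    simp only [PySem.List.insertBy, List.find?]
    cases hq : qual slide_idx tolerance x <;> simp
  | cons z t ih =>
    rw [List.pairwise_cons] at hs
    by_cases hlt : x.1 < z.1
    · have hins : PySem.List.insertBy (fun a b => decide (a.1 < b.1)) x (z :: t) = x :: z :: t := by
        simp [PySem.List.insertBy, hlt]
      rw [hins]
      cases hq : qual slide_idx tolerance x with
      | false =>
        rw [List.find?_cons_of_neg (p := qual slide_idx tolerance) (by simp [hq])]
        cases hfz : List.find? (qual slide_idx tolerance) (z :: t) with
        | none => simp
        | some y => simp
      | true =>
        rw [List.find?_cons_of_pos (p := qual slide_idx tolerance) (by simp [hq])]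
        cases hfz : List.find? (qual slide_idx tolerance) (z :: t) with
        | none => simp
        | some y =>
          have hy : y ∈ z :: t := List.mem_of_find?_eq_some hfz
          have hzy : z.1 ≤ y.1 := by
            rcases List.mem_cons.mp hy with rfl | hy
            · omega
            · exact hs.1 y hy
          have hxy : x.1 < y.1 := by omega
          simp [hq, hxy]
    · simp only [PySem.List.insertBy, hlt, decide_false, Bool.false_eq_true, if_false]
      cases hqz : qual slide_idx tolerance z
      · simp only [List.find?, hqz]
        rw [ih hs.2]
      · simp only [List.find?, hqz]
        have hno : ¬ (qual slide_idx tolerance x = true ∧ x.1 < z.1) := by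
          rintro ⟨_, h⟩; exact hlt h
        simp [hno]

-- first qualifying item of sorted(l) = smallest-key qualifying item of l
lemma find?_sorted_eq_fmin (slide_idx tolerance : Int) (l : List (Int × List Int)) :
    (PySem.List.sorted l Prod.fst false).find? (qual slide_idx tolerance) =
      fmin slide_idx tolerance l := by
  induction l using List.reverseRecOn with
  | nil => simp [fmin, PySem.List.sorted_eq_foldl_insertBy]
  | append_singleton t x ih =>
    have hfold := PySem.List.sorted_eq_foldl_insertBy (xs := t ++ [x]) (key := Prod.fst)
    rw [hfold, List.foldl_append, List.foldl_cons, List.foldl_nil,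
        ← PySem.List.sorted_eq_foldl_insertBy,
        find?_insertBy slide_idx tolerance x _
          (by simpa using PySem.List.sorted_pairwise (xs := t) (key := Prod.fst)),
        ih, fmin_concat]

-- ===== VERDICT (by name: the statement is the Claim_ definition above) =====
theorem is_temporally_consistent_spec : Claim_equal_is_temporally_consistent := by
  intro slide_idx speech_idx aligned_slides tolerance _
  unfold Spec_is_temporally_consistent is_temporally_consistent is_temporally_consistent_alt
  rw [itc_scan_eq]
  cases hb : bmax aligned_slides with
  | none =>
    rcases (bmax_eq_none_iff _).mp hb with rfl
    simp
  | some best =>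
    have hne : aligned_slides ≠ [] := by
      intro h; subst h; simp [bmax] at hb
    obtain ⟨hmem, hmax, hlook⟩ := bmax_spec _ best.1 best.2 (by simpa using hb)
    have hkeys : PySem.List.max? (aligned_slides.map Prod.fst) (fun y => y) = some best.1 := by
      cases hk : PySem.List.max? (aligned_slides.map Prod.fst) (fun y => y) with
      | none =>
        rw [PySem.List.max?_eq_none_iff, List.map_eq_nil_iff] at hk
        exact absurd hk hne
      | some m =>
        have hm1 : m ∈ aligned_slides.map Prod.fst := PySem.List.max?_mem hk
        have hle : best.1 ≤ m := PySem.List.max?_isMax hk best.1 (List.mem_map_of_mem hmem)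
        obtain ⟨z, hz, rfl⟩ := List.mem_map.mp hm1
        have := hmax z hz
        congr 1
        omega
    have hemp : aligned_slides.isEmpty = false := by
      rw [List.isEmpty_eq_false_iff]; exact hne
    rw [hemp]
    simp only [Bool.false_eq_true, if_false, hkeys, hlook]
    cases hm : PySem.List.max? best.2 (fun y => y) with
    | none => simp
    | some c =>
      by_cases hgt : best.1 < slide_idx
      · simp [hgt]
      · simp only [hgt, if_false]
        rw [itc_loop_eq, find?_sorted_eq_fmin]
        cases hf : fmin slide_idx tolerance aligned_slides <;> simp [gnear]
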